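-- pv_equiv track=rewrite | github.com/SWi98/UWr | Sztuczna inteligencja/Lista2/Zadanie1-opt_dist/main.py | is_good
-- ===== SOURCE A (Python) =====
-- import copy
--
-- def is_good(current_sequence, d_values):
--     d_values = copy.deepcopy(d_values)
--     n = len(current_sequence)
--     i = 0
--     test_list = []
--
--     # When we don't want any 1s in our sequence
--     if len(d_values) == 1 and d_values[0] == 0:
--         for i in range(n):
--             if current_sequence[i] == 1:
--                 return False
--         return True
--
--     while i < n:
--         if current_sequence[i] == 1:
--             if len(d_values) == 0:
--                 return False
--             j = i+1
--             counter_of_ones = 1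
--
--             while j < n:
--
--                 if current_sequence[j] == 1:
--                     counter_of_ones += 1
--                     j += 1
--                 else:
--                     j = n
--                     test_list.append(counter_of_ones)
--
--             if counter_of_ones == d_values[0]:
--                 i += counter_of_ones
--                 del d_values[0]
--             else:
--                 return False
--         else:
--             i += 1
--
--     if len(d_values) == 0:
--         return True
--     else:
--         return False
-- ===== SOURCE B (Python) =====
-- def is_good(current_sequence, d_values):
--     # one linear pass: collect maximal run-lengths of 1s
--     runs = []
--     c = 0
--     for x in current_sequence:
--         if x == 1:
--             c += 1
--         else:
--             if c:
--                 runs.append(c)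
--             c = 0
--     if c:
--         runs.append(c)
--     if len(d_values) == 1 and d_values[0] == 0:
--         return not runs
--     return runs == d_values
-- ===== Notes on version B (the rewrite author's own statement) =====
-- stated objective: simpler
-- what changed: Replaces the index-based double while loop (with deepcopy, del-consumption of d_values and a dead test_list) by one linear pass that collects the run-lengths of 1s and compares the resulting list to d_values directly.
import Mathlib
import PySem

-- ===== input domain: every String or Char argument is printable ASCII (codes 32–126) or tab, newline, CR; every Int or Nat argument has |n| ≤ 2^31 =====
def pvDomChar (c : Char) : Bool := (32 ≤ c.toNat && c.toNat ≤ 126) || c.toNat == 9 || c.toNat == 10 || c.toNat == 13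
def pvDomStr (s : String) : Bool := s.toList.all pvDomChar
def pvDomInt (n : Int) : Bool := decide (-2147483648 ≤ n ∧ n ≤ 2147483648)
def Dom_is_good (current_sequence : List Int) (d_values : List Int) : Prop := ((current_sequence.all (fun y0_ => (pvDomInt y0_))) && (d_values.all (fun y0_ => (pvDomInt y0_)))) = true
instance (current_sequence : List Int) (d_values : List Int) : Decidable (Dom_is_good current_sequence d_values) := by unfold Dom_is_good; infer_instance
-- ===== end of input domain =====

-- B replaces A's index-based double while loop (deepcopy, del-consumption of d_values, dead
-- test_list) by one linear pass collecting the run-lengths of 1s and a direct list comparison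
-- (objective: simpler).

-- ===== PORT A =====
-- inner `while j < n` loop: extends the run of 1s; c is counter_of_ones.
-- (the append to test_list is dead state in A — the list is never read — and is not carried)
def isGoodInner (s : List Int) (n j c : Nat) : Nat :=
  if _h : j < n then
    if s.getD j 0 = 1 then isGoodInner s n (j + 1) (c + 1)  -- index j < n is in range, getD is exact
    else c                                                  -- Python sets j = n, ending the loop
  else c
termination_by n - j
decreasing_by exact Nat.sub_succ_lt_self n j _h

-- the port of the outer loop cites this to terminate (i increases by counter_of_ones ≥ 1)
theorem isGoodInner_ge (s : List Int) (n j c : Nat) : c ≤ isGoodInner s n j c := by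
  fun_induction isGoodInner s n j c <;> omega

-- outer `while i < n` loop over (i, d_values); `d_values[0]` / `del d_values[0]` become a match
def isGoodOuter (s : List Int) (n i : Nat) (d : List Int) : Bool :=
  if _h : i < n then
    if s.getD i 0 = 1 then
      match d with
      | [] => false
      | d0 :: rest =>
        let c := isGoodInner s n (i + 1) 1
        if (c : Int) = d0 then isGoodOuter s n (i + c) rest else false
    else isGoodOuter s n (i + 1) d
  else d.isEmpty
termination_by n - i
decreasing_by
  · exact Nat.sub_lt_sub_left _h
      (Nat.lt_of_lt_of_le (Nat.lt_succ_of_le (Nat.le_refl i))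
        (Nat.add_le_add_left (isGoodInner_ge s n (i + 1) 1) i))
  · exact Nat.sub_succ_lt_self n i _h

def is_good (current_sequence : List Int) (d_values : List Int) : Bool :=
  if d_values.length = 1 ∧ d_values.getD 0 0 = 0 then
    !(current_sequence.any (fun x => x == 1))   -- the early-return `for i in range(n)` loop
  else
    isGoodOuter current_sequence current_sequence.length 0 d_values

-- ===== PORT B =====
-- the for loop's state: (runs collected so far, current run counter c)
def runsStep (p : List Int × Nat) (x : Int) : List Int × Nat :=
  if x = 1 then (p.1, p.2 + 1)
  else if p.2 ≠ 0 then (p.1 ++ [(p.2 : Int)], 0) else (p.1, 0)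

def runsOf (s : List Int) : List Int :=
  let p := s.foldl runsStep ([], 0)
  if p.2 ≠ 0 then p.1 ++ [(p.2 : Int)] else p.1   -- flush the trailing run

def is_good_alt (current_sequence : List Int) (d_values : List Int) : Bool :=
  let runs := runsOf current_sequence
  if d_values.length = 1 ∧ d_values.getD 0 0 = 0 then runs.isEmpty
  else runs == d_values

-- ===== PRECONDITION & SPEC =====
def Spec_is_good (current_sequence : List Int) (d_values : List Int) (out : Bool) : Prop := out = is_good_alt current_sequence d_values
instance (current_sequence : List Int) (d_values : List Int) (out : Bool) : Decidable (Spec_is_good current_sequence d_values out) := by unfold Spec_is_good; infer_instance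

-- ===== CLAIM (what is proved, stated in full; the proofs are below) =====
def Claim_equal_is_good : Prop := ∀ (current_sequence : List Int) (d_values : List Int), Dom_is_good current_sequence d_values → Spec_is_good current_sequence d_values (is_good current_sequence d_values)

-- ===== LEMMAS AND PROOFS =====

-- number of leading 1s of a list
def leadOnes : List Int → Nat
  | [] => 0
  | x :: xs => if x = 1 then 1 + leadOnes xs else 0

-- run-lengths of 1s of s, with a pending run of length c already open
def runsPre (c : Nat) : List Int → List Int
  | [] => if c ≠ 0 then [(c : Int)] else []
  | x :: xs => if x = 1 then runsPre (c + 1) xs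
               else if c ≠ 0 then (c : Int) :: runsPre 0 xs else runsPre 0 xs

theorem foldl_runs (s : List Int) (acc : List Int) (c : Nat) :
    (let p := s.foldl runsStep (acc, c); if p.2 ≠ 0 then p.1 ++ [(p.2 : Int)] else p.1)
      = acc ++ runsPre c s := by
  induction s generalizing acc c with
  | nil => simp only [List.foldl_nil, runsPre]; split <;> simp
  | cons x xs ih =>
    simp only [List.foldl_cons, runsStep, runsPre]
    by_cases hx : x = 1
    · simpa [hx] using ih acc (c + 1)
    · by_cases hc : c ≠ 0 <;> simp [hx, hc, ih]

theorem runsOf_eq (s : List Int) : runsOf s = runsPre 0 s := by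
  have h := foldl_runs s [] 0
  simp only [List.nil_append] at h
  exact h

theorem runsPre_pos (c : Nat) (s : List Int) (hc : c ≠ 0) :
    runsPre c s = ((c + leadOnes s : Nat) : Int) :: runsPre 0 (s.drop (leadOnes s)) := by
  induction s generalizing c with
  | nil => simp [runsPre, leadOnes, hc]
  | cons x xs ih =>
    by_cases hx : x = 1
    · simp only [runsPre, leadOnes, hx, ih (c + 1) (by omega)]
      have h1 : (1 : Nat) + leadOnes xs = leadOnes xs + 1 := by omega
      simp [h1, List.drop_succ_cons]
      omega
    · simp [runsPre, leadOnes, hx, hc]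

theorem inner_eq (s : List Int) (j c : Nat) :
    isGoodInner s s.length j c = c + leadOnes (s.drop j) := by
  fun_induction isGoodInner s s.length j c with
  | case1 j c h hone ih =>
    rw [List.drop_eq_getElem_cons h, ih, leadOnes]
    rw [List.getD_eq_getElem?_getD, List.getElem?_eq_getElem h] at hone
    simp at hone
    simp [hone]; omega
  | case2 j c h hone =>
    rw [List.drop_eq_getElem_cons h, leadOnes]
    rw [List.getD_eq_getElem?_getD, List.getElem?_eq_getElem h] at hone
    simp at hone
    simp [hone]
  | case3 j c h =>
    rw [List.drop_eq_nil_of_le (by omega)]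
    simp [leadOnes]

theorem outer_eq (s : List Int) (i : Nat) (d : List Int) :
    isGoodOuter s s.length i d = (runsPre 0 (s.drop i) == d) := by
  fun_induction isGoodOuter s s.length i d with
  | case1 i hlt hone =>
    have hone' : s[i] = 1 := by
      rw [List.getD_eq_getElem?_getD, List.getElem?_eq_getElem hlt] at hone; simpa using hone
    rw [List.drop_eq_getElem_cons hlt,
        show runsPre 0 (s[i] :: List.drop (i + 1) s) = runsPre 1 (List.drop (i + 1) s) by
          simp [runsPre, hone'],
        runsPre_pos 1 _ (by omega)]
    rfl
  | case2 i hlt hone rest c ih =>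
    have hone' : s[i] = 1 := by
      rw [List.getD_eq_getElem?_getD, List.getElem?_eq_getElem hlt] at hone; simpa using hone
    have hc : c = 1 + leadOnes (List.drop (i + 1) s) := inner_eq s (i + 1) 1
    rw [ih, List.drop_eq_getElem_cons hlt,
        show runsPre 0 (s[i] :: List.drop (i + 1) s) = runsPre 1 (List.drop (i + 1) s) by
          simp [runsPre, hone'],
        runsPre_pos 1 _ (by omega), List.cons_beq_cons, hc, List.drop_drop]
    have harith : i + (1 + leadOnes (List.drop (i + 1) s)) = i + 1 + leadOnes (List.drop (i + 1) s) := by omega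
    simp [harith]
  | case3 i hlt hone d0 rest c hne =>
    have hone' : s[i] = 1 := by
      rw [List.getD_eq_getElem?_getD, List.getElem?_eq_getElem hlt] at hone; simpa using hone
    have hc : c = 1 + leadOnes (List.drop (i + 1) s) := inner_eq s (i + 1) 1
    rw [hc] at hne
    rw [List.drop_eq_getElem_cons hlt,
        show runsPre 0 (s[i] :: List.drop (i + 1) s) = runsPre 1 (List.drop (i + 1) s) by
          simp [runsPre, hone'],
        runsPre_pos 1 _ (by omega), List.cons_beq_cons]
    push_cast at hne
    simp [hne]
  | case4 i d hlt hone ih =>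
    have hone' : ¬ s[i] = 1 := by
      rw [List.getD_eq_getElem?_getD, List.getElem?_eq_getElem hlt] at hone; simpa using hone
    rw [ih, List.drop_eq_getElem_cons hlt]
    simp [runsPre, hone']
  | case5 i d h =>
    rw [List.drop_eq_nil_of_le (by omega)]
    simp [runsPre]

theorem any_eq (s : List Int) : (s.any (fun x => x == 1)) = !(runsPre 0 s).isEmpty := by
  induction s with
  | nil => simp [runsPre]
  | cons x xs ih =>
    by_cases hx : x = 1
    · simp [runsPre, hx, runsPre_pos 1 _ (by omega)]
    · simp [runsPre, hx, ih]

-- ===== VERDICT (by name: the statement is the Claim_ definition above) =====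
theorem is_good_spec : Claim_equal_is_good := by
  intro s d _
  unfold Spec_is_good is_good is_good_alt
  by_cases hsp : d.length = 1 ∧ d.getD 0 0 = 0
  · rw [if_pos hsp, if_pos hsp, runsOf_eq, any_eq, Bool.not_not]
  · rw [if_neg hsp, if_neg hsp, runsOf_eq, outer_eq s 0 d, List.drop_zero]
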